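-- pv_equiv track=rewrite | github.com/adachel/Python_Start | Education/Tasks/Difficulty_1_10/Task_757/Task_757.py | Calc
-- ===== SOURCE A (Python) =====
-- def Calc(arr):
--     base = [2, 6, 1]
--     count = 0
--     while (arr[0] - base[0]) >= 0 and (arr[1] - base[1]) >= 0 and (arr[2] - base[2]) >= 0:
--         arr[0] = arr[0] - base[0]; arr[1] = arr[1] - base[1]; arr[2] = arr[2] - base[2]
--         count += 1
--     res = count
--     return res
-- ===== SOURCE B (Python) =====
-- def Calc(arr):
--     # closed form: number of times (2,6,1) can be subtracted before some component goes negative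
--     return max(0, min(arr[0] // 2, arr[1] // 6, arr[2]))
-- ===== Notes on version B (the rewrite author's own statement) =====
-- stated objective: faster
-- what changed: Replaces the repeated-subtraction while loop (which mutates arr in place) by the closed form max(0, min(arr[0]//2, arr[1]//6, arr[2])).
-- outside the precondition, e.g. on Calc([0]): A returns 0, B raises IndexError; on Calc([5, 1]): A returns 0, B raises IndexError
import Mathlib
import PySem

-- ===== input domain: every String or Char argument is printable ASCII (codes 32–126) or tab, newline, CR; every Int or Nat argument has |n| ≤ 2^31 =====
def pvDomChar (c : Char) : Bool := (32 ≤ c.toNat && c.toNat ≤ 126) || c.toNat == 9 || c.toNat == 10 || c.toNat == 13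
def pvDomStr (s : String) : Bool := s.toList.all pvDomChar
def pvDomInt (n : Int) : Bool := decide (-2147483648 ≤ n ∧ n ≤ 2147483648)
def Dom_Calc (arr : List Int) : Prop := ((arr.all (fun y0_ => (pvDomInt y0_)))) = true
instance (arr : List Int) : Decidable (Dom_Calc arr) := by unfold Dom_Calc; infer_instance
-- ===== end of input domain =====

-- B replaces A's repeated-subtraction loop by the closed form max(0, min(arr[0]//2, arr[1]//6, arr[2])) (O(1)).
-- Note: Python A mutates arr in place (the equivalence proved is about the return value only); B does not mutate.

-- ===== PORT A =====
-- the while loop of A: state is (arr[0], arr[1], arr[2], count)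
def CalcLoop (a0 a1 a2 count : Int) : Int :=
  if a0 - 2 ≥ 0 ∧ a1 - 6 ≥ 0 ∧ a2 - 1 ≥ 0 then
    CalcLoop (a0 - 2) (a1 - 6) (a2 - 1) (count + 1)
  else count
termination_by a0.toNat
decreasing_by omega

def Calc (arr : List Int) : Int :=
  match PySem.List.pyGet? arr 0, PySem.List.pyGet? arr 1, PySem.List.pyGet? arr 2 with
  | some a0, some a1, some a2 => CalcLoop a0 a1 a2 0
  | _, _, _ => 0  -- IndexError in Python: excluded by Pre_Calc

-- ===== PORT B =====
def Calc_alt (arr : List Int) : Int :=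
  ((PySem.List.pyGet? arr 0).bind fun a0 =>
   (PySem.List.pyGet? arr 1).bind fun a1 =>
   (PySem.List.pyGet? arr 2).map fun a2 =>
     max 0 (min (PySem.Int.floordiv a0 2) (min (PySem.Int.floordiv a1 6) a2))).getD 0
  -- none = IndexError in Python: excluded by Pre_Calc

-- ===== PRECONDITION & SPEC =====
-- Pre_ excludes lists shorter than 3, where B's arr[0]//2 raises IndexError while A's short-circuiting
-- while condition may return 0 before reaching the missing index (e.g. [0]).
def Pre_Calc (arr : List Int) : Prop := 3 ≤ arr.length
instance (arr : List Int) : Decidable (Pre_Calc arr) := by unfold Pre_Calc; infer_instance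
def pvWitness_Calc : List Int := [7, 13, 4]

def Spec_Calc (arr : List Int) (out : Int) : Prop := out = Calc_alt arr
instance (arr : List Int) (out : Int) : Decidable (Spec_Calc arr out) := by unfold Spec_Calc; infer_instance

-- ===== CLAIM (what is proved, stated in full; the proofs are below) =====
def Claim_equal_Calc : Prop := ∀ (arr : List Int), Dom_Calc arr → Pre_Calc arr → Spec_Calc arr (Calc arr)

-- ===== LEMMAS AND PROOFS =====
theorem CalcLoop_closed (a0 a1 a2 count : Int) :
    CalcLoop a0 a1 a2 count = count + max 0 (min (a0 / 2) (min (a1 / 6) a2)) := by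
  induction a0, a1, a2, count using CalcLoop.induct with
  | case1 a0 a1 a2 count h ih =>
      rw [CalcLoop, if_pos h, ih]
      omega
  | case2 a0 a1 a2 count h =>
      rw [CalcLoop, if_neg h]
      omega

-- ===== VERDICT (by name: the statement is the Claim_ definition above) =====
theorem Calc_spec : Claim_equal_Calc := by
  intro arr _ hpre
  unfold Spec_Calc Calc Calc_alt
  match harr : arr with
  | a0 :: a1 :: a2 :: rest =>
      have h0 : (0 : Int) ≤ (rest.length : Int) + 1 + 1 := by positivity
      have h1 : (0 : Int) ≤ (rest.length : Int) + 1 := by positivity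
      have h2 : (2 : Int) ≤ (rest.length : Int) + 1 + 1 := by omega
      simp [PySem.List.pyGet?, PySem.List.pyIdx?, CalcLoop_closed, Option.bind,
            PySem.Int.floordiv_eq_ediv_of_pos, h0, h1, h2]
  | [] => simp [Pre_Calc] at hpre
  | [_] => simp [Pre_Calc] at hpre
  | [_, _] => simp [Pre_Calc] at hpre
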